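-- pv_equiv track=rewrite | github.com/lore6e7a6f/Olicyber-Journey | solves/crypto/VeryStrongVigenere.py | brute_force_linear
-- ===== SOURCE A (Python) =====
-- import string
--
-- alphabet = string.ascii_lowercase
--
-- def vigenere_decrypt(ciphertext, key):
--     plaintext = ""
--     key_index = 0
--
--     for char in ciphertext:
--         if char.isalpha():
--             shift = ord(key[key_index % len(key)]) - ord('a')
--             base = ord('A') if char.isupper() else ord('a')
--             plaintext += chr((ord(char) - base - shift) % 26 + base)
--             key_index += 1
--         else:
--             plaintext += char
--     return plaintext
--
-- def brute_force_linear(ciphertext, max_len=2):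
--     for c1 in alphabet:
--         yield c1, vigenere_decrypt(ciphertext, c1)
--
--     if max_len >= 2:
--         for c1 in alphabet:
--             for c2 in alphabet:
--                 key = c1 + c2
--                 yield key, vigenere_decrypt(ciphertext, key)
-- ===== SOURCE B (Python) =====
-- import string
--
-- alphabet = string.ascii_lowercase
--
-- def brute_force_linear(ciphertext, max_len=2):
--     # Precompute the 26 uniform-shift decryptions once; two-char keys are then
--     # assembled by interleaving two precomputed strings on alpha-position parity.
--     decs = []
--     for s in range(26):
--         chars = []
--         for c in ciphertext:
--             if c.isalpha():
--                 base = ord('A') if c.isupper() else ord('a')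
--                 chars.append(chr((ord(c) - base - s) % 26 + base))
--             else:
--                 chars.append(c)
--         decs.append(''.join(chars))
--
--     for s in range(26):
--         yield chr(ord('a') + s), decs[s]
--
--     if max_len >= 2:
--         for s1 in range(26):
--             d1 = decs[s1]
--             for s2 in range(26):
--                 d2 = decs[s2]
--                 out = []
--                 k = 0
--                 for i, c in enumerate(ciphertext):
--                     if c.isalpha():
--                         out.append(d1[i] if k % 2 == 0 else d2[i])
--                         k += 1
--                     else:
--                         out.append(c)
--                 yield chr(ord('a') + s1) + chr(ord('a') + s2), ''.join(out)
-- ===== Notes on version B (the rewrite author's own statement) =====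
-- stated objective: faster
-- what changed: B precomputes the 26 uniform-shift decryptions of the ciphertext once and builds each two-char-key plaintext by interleaving two precomputed strings on alpha-position parity, instead of re-running the full Vigenere per-character shift arithmetic for each of the 676 two-char keys.
import Mathlib
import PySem

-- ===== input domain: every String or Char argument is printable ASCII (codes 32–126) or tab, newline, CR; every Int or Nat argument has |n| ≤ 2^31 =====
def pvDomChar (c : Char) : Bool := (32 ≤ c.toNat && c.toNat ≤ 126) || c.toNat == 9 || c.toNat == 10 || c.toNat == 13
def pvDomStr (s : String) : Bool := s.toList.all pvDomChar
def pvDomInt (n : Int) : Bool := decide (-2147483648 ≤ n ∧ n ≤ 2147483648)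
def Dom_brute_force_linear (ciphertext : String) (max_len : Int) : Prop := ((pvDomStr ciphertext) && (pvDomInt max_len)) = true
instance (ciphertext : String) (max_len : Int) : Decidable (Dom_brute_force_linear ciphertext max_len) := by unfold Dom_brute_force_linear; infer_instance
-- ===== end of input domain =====

-- B precomputes the 26 uniform-shift decryptions once and assembles each two-char-key
-- plaintext by interleaving two precomputed strings on alpha-position parity (objective: faster constant factor).

-- ===== PORT A =====
def pyAlphabet : List Char := "abcdefghijklmnopqrstuvwxyz".toList

-- one iteration of A's loop body, on the state (plaintext, key_index);
-- key[key_index % len(key)]: the index is always in range (key is nonempty at every call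
-- site and key_index % len(key) < len(key)), so getD with an unreachable default is exact
def vigStep (key : List Char) (st : List Char × Nat) (char : Char) : List Char × Nat :=
  if PySem.Chars.isalpha char then
    let shift : Int := (Int.ofNat (key.getD (st.2 % key.length) 'a').toNat) - 97
    let base : Int := if PySem.Chars.isupper char then 65 else 97
    (st.1 ++ [Char.ofNat (PySem.Int.mod ((char.toNat : Int) - base - shift) 26 + base).toNat], st.2 + 1)
  else (st.1 ++ [char], st.2)

def vigenere_decrypt (ciphertext : String) (key : String) : String :=
  String.ofList (ciphertext.toList.foldl (vigStep key.toList) ([], 0)).1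

def brute_force_linear (ciphertext : String) (max_len : Int) : List (String × String) :=
  (pyAlphabet.map (fun c1 => (String.ofList [c1], vigenere_decrypt ciphertext (String.ofList [c1])))) ++
  (if max_len ≥ 2 then
     pyAlphabet.flatMap (fun c1 => pyAlphabet.map (fun c2 =>
       (String.ofList [c1, c2], vigenere_decrypt ciphertext (String.ofList [c1, c2]))))
   else [])

-- ===== PORT B =====
-- one full decryption of the ciphertext under a single uniform shift s
def shiftDecrypt (cl : List Char) (s : Nat) : List Char :=
  cl.map (fun c =>
    if PySem.Chars.isalpha c then
      let base : Int := if PySem.Chars.isupper c then 65 else 97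
      Char.ofNat (PySem.Int.mod ((c.toNat : Int) - base - (s : Int)) 26 + base).toNat
    else c)

-- walk ciphertext and the two precomputed decryptions in step, choosing by alpha-parity k
def combineParity : List Char → List Char → List Char → Nat → List Char
  | c :: cs, x :: xs, y :: ys, k =>
    if PySem.Chars.isalpha c then
      (if k % 2 = 0 then x else y) :: combineParity cs xs ys (k + 1)
    else c :: combineParity cs xs ys k
  | _, _, _, _ => []

def brute_force_linear_alt (ciphertext : String) (max_len : Int) : List (String × String) :=
  let cl := ciphertext.toList
  let decs := (List.range 26).map (fun s => shiftDecrypt cl s)   -- range(26)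
  ((List.range 26).map (fun s => (String.ofList [Char.ofNat (97 + s)], String.ofList (decs.getD s [])))) ++
  (if max_len ≥ 2 then
     (List.range 26).flatMap (fun s1 => (List.range 26).map (fun s2 =>
       (String.ofList [Char.ofNat (97 + s1), Char.ofNat (97 + s2)],
        String.ofList (combineParity cl (decs.getD s1 []) (decs.getD s2 []) 0))))
   else [])

-- ===== PRECONDITION & SPEC =====
def Spec_brute_force_linear (ciphertext : String) (max_len : Int) (out : List (String × String)) : Prop := out = brute_force_linear_alt ciphertext max_len
instance (ciphertext : String) (max_len : Int) (out : List (String × String)) : Decidable (Spec_brute_force_linear ciphertext max_len out) := by unfold Spec_brute_force_linear; infer_instance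

-- ===== CLAIM (what is proved, stated in full; the proofs are below) =====
def Claim_equal_brute_force_linear : Prop := ∀ (ciphertext : String) (max_len : Int), Dom_brute_force_linear ciphertext max_len → Spec_brute_force_linear ciphertext max_len (brute_force_linear ciphertext max_len)

-- ===== LEMMAS AND PROOFS =====

-- direct-recursion characterisation of A's decryption loop
def vigCore (key : List Char) : List Char → Nat → List Char
  | [], _ => []
  | c :: cs, k =>
    if PySem.Chars.isalpha c then
      (let shift : Int := (Int.ofNat (key.getD (k % key.length) 'a').toNat) - 97
       let base : Int := if PySem.Chars.isupper c then 65 else 97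
       Char.ofNat (PySem.Int.mod ((c.toNat : Int) - base - shift) 26 + base).toNat) :: vigCore key cs (k + 1)
    else c :: vigCore key cs k

theorem vig_fold (key : List Char) (ct : List Char) (acc : List Char) (k : Nat) :
    (ct.foldl (vigStep key) (acc, k)).1 = acc ++ vigCore key ct k := by
  induction ct generalizing acc k with
  | nil => simp [vigCore]
  | cons c cs ih =>
    rw [List.foldl_cons]
    by_cases h : PySem.Chars.isalpha c = true
    · rw [show vigStep key (acc, k) c =
          (acc ++ [Char.ofNat (PySem.Int.mod ((c.toNat : Int) -
              (if PySem.Chars.isupper c then (65:Int) else 97) -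
              ((Int.ofNat (key.getD (k % key.length) 'a').toNat) - 97)) 26 +
              (if PySem.Chars.isupper c then (65:Int) else 97)).toNat], k + 1) from by
            simp [vigStep, h]]
      rw [ih]
      simp [vigCore, h]
    · rw [show vigStep key (acc, k) c = (acc ++ [c], k) from by simp [vigStep, h]]
      rw [ih]
      simp [vigCore, h]

theorem vigenere_decrypt_eq (ciphertext : String) (key : String) :
    vigenere_decrypt ciphertext key = String.ofList (vigCore key.toList ciphertext.toList 0) := by
  unfold vigenere_decrypt
  rw [vig_fold]
  rfl

theorem vig_single (ct : List Char) (c : Char) (s : Nat)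
    (h : (c.toNat : Int) - 97 = (s : Int)) (k : Nat) :
    vigCore [c] ct k = shiftDecrypt ct s := by
  induction ct generalizing k with
  | nil => simp [vigCore, shiftDecrypt]
  | cons x xs ih =>
    by_cases hx : PySem.Chars.isalpha x = true
    · simp only [vigCore, shiftDecrypt, hx, if_pos, List.map_cons]
      refine congrArg₂ List.cons ?_ ?_
      · simp [Nat.mod_one, h]
      · simpa [shiftDecrypt] using ih (k + 1)
    · simp only [vigCore, shiftDecrypt, hx, List.map_cons, if_neg, Bool.false_eq_true,
        not_false_iff, reduceIte]
      exact congrArg₂ List.cons rfl (by simpa [shiftDecrypt] using ih k)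

theorem vig_double (ct : List Char) (c1 c2 : Char) (s1 s2 : Nat)
    (h1 : (c1.toNat : Int) - 97 = (s1 : Int)) (h2 : (c2.toNat : Int) - 97 = (s2 : Int))
    (k : Nat) :
    combineParity ct (shiftDecrypt ct s1) (shiftDecrypt ct s2) k = vigCore [c1, c2] ct k := by
  induction ct generalizing k with
  | nil => simp [combineParity, shiftDecrypt, vigCore]
  | cons x xs ih =>
    by_cases hx : PySem.Chars.isalpha x = true
    · rcases Nat.mod_two_eq_zero_or_one k with hk | hk <;>
      · simp only [shiftDecrypt, List.map_cons, combineParity, vigCore, hx, if_pos, hk]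
        refine congrArg₂ List.cons ?_ ?_
        · simp [hk, h1, h2]
        · simpa [shiftDecrypt] using ih (k + 1)
    · simp only [shiftDecrypt, List.map_cons, combineParity, vigCore, hx, Bool.false_eq_true,
        not_false_iff, reduceIte]
      exact congrArg₂ List.cons rfl (by simpa [shiftDecrypt] using ih k)

theorem alphabet_eq : pyAlphabet = (List.range 26).map (fun s => Char.ofNat (97 + s)) := by decide

theorem char_shift : ∀ s ∈ List.range 26, (((Char.ofNat (97 + s)).toNat : Int)) - 97 = (s : Int) := by decide

theorem getD_map_range (f : Nat → List Char) (s : Nat) (h : s < 26) :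
    ((List.range 26).map f).getD s [] = f s := by
  rw [List.getD_eq_getElem?_getD, List.getElem?_map, List.getElem?_range h]; rfl

-- ===== VERDICT (by name: the statement is the Claim_ definition above) =====
theorem brute_force_linear_spec : Claim_equal_brute_force_linear := by
  intro ciphertext max_len _
  unfold Spec_brute_force_linear brute_force_linear brute_force_linear_alt
  congr 1
  · rw [alphabet_eq, List.map_map]
    refine List.map_congr_left ?_
    intro s hs
    have hlt : s < 26 := by simpa using hs
    simp only [Function.comp]
    rw [getD_map_range _ s hlt, vigenere_decrypt_eq]
    refine congrArg₂ Prod.mk rfl (congrArg String.ofList ?_)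
    rw [show (String.ofList [Char.ofNat (97 + s)]).toList = [Char.ofNat (97 + s)] from by simp]
    exact vig_single ciphertext.toList _ s (char_shift s hs) 0
  · split
    · rw [alphabet_eq, List.flatMap_map]
      refine List.flatMap_congr ?_
      intro s1 hs1
      rw [List.map_map]
      refine List.map_congr_left ?_
      intro s2 hs2
      have h1 : s1 < 26 := by simpa using hs1
      have h2 : s2 < 26 := by simpa using hs2
      simp only [Function.comp]
      rw [getD_map_range _ s1 h1, getD_map_range _ s2 h2, vigenere_decrypt_eq]
      refine congrArg₂ Prod.mk rfl (congrArg String.ofList ?_)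
      rw [show (String.ofList [Char.ofNat (97 + s1), Char.ofNat (97 + s2)]).toList
            = [Char.ofNat (97 + s1), Char.ofNat (97 + s2)] from by simp]
      rw [vig_double ciphertext.toList _ _ s1 s2 (char_shift s1 hs1) (char_shift s2 hs2) 0]
    · rfl
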